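-- pv_equiv track=rewrite | github.com/sheryllan/Algo | gs/number_of_investments.py | analyzeInvestments
-- ===== SOURCE A (Python) =====
-- def analyzeInvestments(s: str):
--     n = len(s)
--     companies = {'A', 'B', 'C'}
--     last_at = {}
--     count = 0
--     j = 0
--     for i, char in enumerate(s[:-2]):
--         while len(last_at) < 3 and j < n:
--             if s[j] in companies:
--                 last_at[s[j]] = j
--             j += 1
--
--         if len(last_at) == 3 and j <= n:
--             count += n - j + 1
--
--         if char in last_at and last_at[char] == i:
--             last_at.pop(char)
--
--     return count
-- ===== SOURCE B (Python) =====
-- def analyzeInvestments(s: str):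
--     n = len(s)
--     nxt = {'A': n, 'B': n, 'C': n}
--     count = 0
--     for i in range(n - 1, -1, -1):
--         c = s[i]
--         if c in nxt:
--             nxt[c] = i
--         m = max(nxt['A'], nxt['B'], nxt['C'])
--         if m < n:
--             count += n - m
--     return count
-- ===== Notes on version B (the rewrite author's own statement) =====
-- stated objective: simpler
-- what changed: Replaces the start-side two-pointer (a dict of last occurrences inside the window, a while-loop refill and a pop per start) by a single backward pass that keeps the next occurrence index of each company and adds the closed-form contribution n - max(nextA,nextB,nextC) per start position.
import Mathlib
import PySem

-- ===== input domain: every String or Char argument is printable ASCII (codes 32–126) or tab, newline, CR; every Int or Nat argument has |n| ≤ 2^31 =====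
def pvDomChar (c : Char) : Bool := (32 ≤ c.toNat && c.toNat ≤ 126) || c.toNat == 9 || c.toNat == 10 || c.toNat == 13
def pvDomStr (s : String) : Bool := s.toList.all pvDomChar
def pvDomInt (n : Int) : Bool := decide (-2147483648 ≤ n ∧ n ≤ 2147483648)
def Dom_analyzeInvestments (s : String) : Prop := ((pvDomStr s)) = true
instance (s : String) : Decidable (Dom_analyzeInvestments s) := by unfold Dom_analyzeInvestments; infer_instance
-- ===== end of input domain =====

-- B replaces A's start-side two-pointer (dict of last occurrences, while-refill, pop) by a single
-- backward pass keeping the next occurrence of each company and adding a closed-form contribution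
-- per start index; objective: simpler.

-- ===== PORT A =====
-- the inner 'while' loop of A: advance j until last_at holds all three companies or j = n
def aWhile (cs : List Char) (companies : PySem.Set Char) (n : Int)
    (la : PySem.Dict Char Int) (j : Int) : PySem.Dict Char Int × Int :=
  if _h : la.size < 3 ∧ j < n then
    -- s[j] (= pyGetD cs j ' ') is always in range here (0 ≤ j < n), as in the Python
    aWhile cs companies n
      (if PySem.Set.contains companies (PySem.List.pyGetD cs j ' ') then
        la.insert (PySem.List.pyGetD cs j ' ') j else la) (j + 1)
  else (la, j)
termination_by (n - j).toNat
decreasing_by omega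

def analyzeInvestments (s : String) : Int :=
  let cs := s.toList
  let n : Int := PySem.Str.len s
  let companies : PySem.Set Char := PySem.Set.ofList ['A', 'B', 'C']
  let r := (PySem.List.enumerate (PySem.List.slice cs none (some (-2))) 0).foldl
    (fun (st : PySem.Dict Char Int × Int × Int) (p : Int × Char) =>
      let w := aWhile cs companies n st.1 st.2.2
      let count := if w.1.size = 3 ∧ w.2 ≤ n then st.2.1 + (n - w.2 + 1) else st.2.1
      let la := if w.1.contains p.2 = true ∧ w.1.get? p.2 = some p.1 then w.1.erase p.2 else w.1
      (la, count, w.2))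
    (PySem.Dict.empty, 0, 0)
  r.2.1

-- ===== PORT B =====
def analyzeInvestments_alt (s : String) : Int :=
  let cs := s.toList
  let n : Int := PySem.Str.len s
  let r := (PySem.List.pyRange (n - 1) (-1) (-1)).foldl
    (fun (st : PySem.Dict Char Int × Int) (i : Int) =>
      let c := PySem.List.pyGetD cs i ' '   -- s[i]; always in range here (0 ≤ i < n)
      let nxt := if st.1.contains c then st.1.insert c i else st.1
      let m := max (max (nxt.getD 'A' 0) (nxt.getD 'B' 0)) (nxt.getD 'C' 0)
      (nxt, if m < n then st.2 + (n - m) else st.2))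
    (PySem.Dict.ofList [('A', n), ('B', n), ('C', n)], 0)
  r.2

-- ===== PRECONDITION & SPEC =====
def Spec_analyzeInvestments (s : String) (out : Int) : Prop := out = analyzeInvestments_alt s
instance (s : String) (out : Int) : Decidable (Spec_analyzeInvestments s out) := by unfold Spec_analyzeInvestments; infer_instance

-- ===== CLAIM (what is proved, stated in full; the proofs are below) =====
def Claim_equal_analyzeInvestments : Prop := ∀ (s : String), Dom_analyzeInvestments s → Spec_analyzeInvestments s (analyzeInvestments s)

-- ===== LEMMAS AND PROOFS =====

-- ---- generic Dict.erase facts (no erase lemmas exist in the prelude) ----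
theorem dict_get?_erase {κ ν : Type} [BEq κ] [LawfulBEq κ] [DecidableEq κ] (d : PySem.Dict κ ν) (k c : κ) :
    (d.erase k).get? c = if c = k then none else d.get? c := by
  obtain ⟨items⟩ := d
  induction items with
  | nil => simp [PySem.Dict.erase, PySem.Dict.get?]
  | cons p t ih =>
    simp only [PySem.Dict.erase, PySem.Dict.get?, List.filter_cons] at ih ⊢
    by_cases hpk : p.1 = k <;> by_cases hpc : p.1 = c <;>
      simp_all [beq_iff_eq]

theorem dict_keys_erase {κ ν : Type} [BEq κ] (d : PySem.Dict κ ν) (k : κ) :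
    (d.erase k).keys = d.keys.filter (fun x => !(x == k)) := by
  obtain ⟨items⟩ := d
  induction items with
  | nil => rfl
  | cons p t ih =>
    simp only [PySem.Dict.erase, PySem.Dict.keys, List.filter_cons] at ih ⊢
    cases h : (p.1 == k) <;> simp_all

theorem dict_size_erase_lt {κ ν : Type} [BEq κ] (d : PySem.Dict κ ν) (k : κ)
    (h : d.contains k = true) : (d.erase k).size < d.size := by
  simp only [PySem.Dict.size, PySem.Dict.erase]
  rw [List.length_filter_lt_length_iff_exists]
  simp only [PySem.Dict.contains, List.any_eq_true] at h
  obtain ⟨p, hp, hpk⟩ := h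
  exact ⟨p, hp, by simp [hpk]⟩

-- ---- next occurrence of a character at or after position i ----
def nextOcc (l : List Char) (c : Char) (i : Nat) : Nat := i + (l.drop i).findIdx (· == c)

def minEnd3 (l : List Char) (i : Nat) : Nat :=
  max (max (nextOcc l 'A' i) (nextOcc l 'B' i)) (nextOcc l 'C' i)

theorem nextOcc_lb (l : List Char) (c : Char) (i : Nat) : i ≤ nextOcc l c i :=
  Nat.le_add_right _ _

theorem nextOcc_le (l : List Char) (c : Char) {i : Nat} (h : i ≤ l.length) :
    nextOcc l c i ≤ l.length := by
  have := List.findIdx_le_length (p := (· == c)) (xs := l.drop i)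
  simp only [List.length_drop] at this
  unfold nextOcc; omega

theorem nextOcc_len (l : List Char) (c : Char) : nextOcc l c l.length = l.length := by
  simp [nextOcc]

theorem nextOcc_succ (l : List Char) (c : Char) {i : Nat} (h : i < l.length) :
    nextOcc l c i = if l[i] == c then i else nextOcc l c (i + 1) := by
  unfold nextOcc
  rw [List.drop_eq_getElem_cons h, List.findIdx_cons]
  cases hc : (l[i] == c)
  · simp only [Bool.cond_false, Bool.false_eq_true, if_false]
    omega
  · simp

theorem nextOcc_getElem (l : List Char) (c : Char) {i : Nat}
    (h : nextOcc l c i < l.length) : l[nextOcc l c i]'h = c := by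
  have hi : i ≤ l.length := le_of_lt (lt_of_le_of_lt (nextOcc_lb l c i) h)
  have hfl : (l.drop i).findIdx (· == c) < (l.drop i).length := by
    simp only [List.length_drop]; unfold nextOcc at h; omega
  have := List.findIdx_getElem (p := (· == c)) (xs := l.drop i) (w := hfl)
  rw [List.getElem_drop] at this
  simpa [nextOcc, beq_iff_eq] using this

theorem nextOcc_le_of_found (l : List Char) {c : Char} {i k : Nat}
    (hik : i ≤ k) (hk : k < l.length) (hc : l[k] = c) : nextOcc l c i ≤ k := by
  induction hgap : k - i generalizing i with
  | zero =>
    have : i = k := by omega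
    subst this
    rw [nextOcc_succ l c hk]
    simp [hc]
  | succ g ih =>
    have hi : i < l.length := by omega
    rw [nextOcc_succ l c hi]
    split
    · omega
    · exact ih (by omega) (by omega)

theorem nextOcc_mono (l : List Char) (c : Char) (k : Nat) :
    nextOcc l c k ≤ nextOcc l c (k + 1) := by
  by_cases h : k < l.length
  · rw [nextOcc_succ l c h]
    split
    · exact le_trans (by omega) (nextOcc_lb l c (k+1))
    · exact le_rfl
  · unfold nextOcc
    rw [List.drop_eq_nil_of_le (by omega), List.drop_eq_nil_of_le (by omega)]
    simp

theorem minEnd3_lb (l : List Char) (k : Nat) : k ≤ minEnd3 l k :=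
  le_trans (nextOcc_lb l 'A' k) (le_trans (le_max_left _ _) (le_max_left _ _))

theorem minEnd3_le (l : List Char) {k : Nat} (h : k ≤ l.length) : minEnd3 l k ≤ l.length := by
  unfold minEnd3
  have := nextOcc_le l 'A' h; have := nextOcc_le l 'B' h; have := nextOcc_le l 'C' h
  omega

theorem minEnd3_mono (l : List Char) (k : Nat) : minEnd3 l k ≤ minEnd3 l (k + 1) := by
  unfold minEnd3
  have := nextOcc_mono l 'A' k; have := nextOcc_mono l 'B' k; have := nextOcc_mono l 'C' k
  omega

-- all three companies need ≥ 3 positions: within 2 characters of the end minEnd3 is the length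
theorem minEnd3_big (l : List Char) {k : Nat} (hk : k ≤ l.length) (h2 : l.length ≤ k + 2) :
    minEnd3 l k = l.length := by
  by_contra hne
  have hlt : minEnd3 l k < l.length :=
    lt_of_le_of_ne (minEnd3_le l hk) hne
  have hA : nextOcc l 'A' k < l.length := by unfold minEnd3 at hlt; omega
  have hB : nextOcc l 'B' k < l.length := by unfold minEnd3 at hlt; omega
  have hC : nextOcc l 'C' k < l.length := by unfold minEnd3 at hlt; omega
  have eA := nextOcc_getElem l 'A' hA
  have eB := nextOcc_getElem l 'B' hB
  have eC := nextOcc_getElem l 'C' hC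
  have lA := nextOcc_lb l 'A' k; have lB := nextOcc_lb l 'B' k; have lC := nextOcc_lb l 'C' k
  have key : ∀ {x y : Nat} (hx : x < l.length) (hy : y < l.length), x = y → l[x]'hx = l[y]'hy := by
    intro x y hx hy h; subst h; rfl
  have hAB : nextOcc l 'A' k ≠ nextOcc l 'B' k := fun h => by
    have := key hA hB h; rw [eA, eB] at this; exact absurd this (by decide)
  have hAC : nextOcc l 'A' k ≠ nextOcc l 'C' k := fun h => by
    have := key hA hC h; rw [eA, eC] at this; exact absurd this (by decide)
  have hBC : nextOcc l 'B' k ≠ nextOcc l 'C' k := fun h => by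
    have := key hB hC h; rw [eB, eC] at this; exact absurd this (by decide)
  omega

-- ---- last occurrence of c in the window [a, b) ----
def lastIn (l : List Char) (a b : Nat) (c : Char) : Option Nat :=
  if _h : a < b then (if l[b-1]? = some c then some (b-1) else lastIn l a (b-1) c) else none
termination_by b
decreasing_by omega

theorem lastIn_none (l : List Char) {a b : Nat} (h : b ≤ a) (c : Char) :
    lastIn l a b c = none := by
  rw [lastIn]; simp [Nat.not_lt.mpr h]

theorem lastIn_succ (l : List Char) {a b : Nat} (h : a ≤ b) (c : Char) :
    lastIn l a (b + 1) c = if l[b]? = some c then some b else lastIn l a b c := by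
  rw [lastIn]
  simp [Nat.lt_succ_of_le h]

theorem lastIn_spec (l : List Char) {a b : Nat} {c : Char} {x : Nat}
    (h : lastIn l a b c = some x) : a ≤ x ∧ x < b ∧ l[x]? = some c := by
  induction b with
  | zero => rw [lastIn_none l (by omega)] at h; exact absurd h (by simp)
  | succ b ih =>
    by_cases hab : a ≤ b
    · rw [lastIn_succ l hab] at h
      split at h
      · rename_i hc
        obtain rfl : b = x := by simpa using h
        exact ⟨hab, by omega, hc⟩
      · obtain ⟨h1, h2, h3⟩ := ih h
        exact ⟨h1, by omega, h3⟩
    · rw [lastIn_none l (by omega)] at h; exact absurd h (by simp)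

theorem lastIn_isSome_iff (l : List Char) {a b : Nat} (hb : b ≤ l.length) (c : Char) :
    (lastIn l a b c).isSome ↔ nextOcc l c a < b := by
  induction b with
  | zero =>
    rw [lastIn_none l (by omega)]
    simp
  | succ b ih =>
    by_cases hab : a ≤ b
    · rw [lastIn_succ l hab]
      have hbl : b < l.length := by omega
      by_cases hc : l[b]? = some c
      · have : l[b] = c := by simpa [List.getElem?_eq_getElem hbl] using hc
        simp only [hc, if_true, Option.isSome_some, true_iff]
        have := nextOcc_le_of_found l hab hbl this
        omega
      · simp only [hc, if_false]
        rw [ih (by omega)]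
        constructor
        · omega
        · intro h
          rcases Nat.lt_or_ge (nextOcc l c a) b with h' | h'
          · exact h'
          · exfalso
            have he : nextOcc l c a = b := by omega
            have hg := nextOcc_getElem l c (i := a) (h := by omega)
            simp only [he] at hg
            exact hc (by rw [List.getElem?_eq_getElem hbl, hg])
    · rw [lastIn_none l (by omega)]
      have := nextOcc_lb l c a
      simp only [Option.isSome_none, Bool.false_eq_true, false_iff]
      omega

theorem lastIn_shift (l : List Char) (a b : Nat) (c : Char) :
    lastIn l (a + 1) b c = if lastIn l a b c = some a then none else lastIn l a b c := by
  induction b with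
  | zero => rw [lastIn_none l (by omega), lastIn_none l (by omega)]; simp
  | succ b ih =>
    by_cases hab : a + 1 ≤ b
    · rw [lastIn_succ l hab, lastIn_succ l (by omega)]
      by_cases hc : l[b]? = some c
      · simp only [hc, if_true]
        have : ¬ (some b = some a) := by simp; omega
        simp [this]
      · simp only [hc, if_false]
        exact ih
    · by_cases hba : b = a
      · subst hba
        rw [lastIn_none l (by omega), lastIn_succ l (le_refl b)]
        rw [lastIn_none l (le_refl b)]
        by_cases hc : l[b]? = some c
        · simp [hc]
        · simp [hc]
      · rw [lastIn_none l (by omega), lastIn_none l (by omega)]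
        simp

-- ---- the invariant tying A's last_at dict to the window [k, j) ----
def wget (l : List Char) (k j : Nat) (c : Char) : Option Int :=
  if c = 'A' ∨ c = 'B' ∨ c = 'C' then (lastIn l k j c).map (fun x => (x : Int)) else none

def WD (l : List Char) (k j : Nat) (d : PySem.Dict Char Int) : Prop :=
  d.keys.Nodup ∧ ∀ c : Char, d.get? c = wget l k j c

theorem WD_size (l : List Char) {k j : Nat} {d : PySem.Dict Char Int} (h : WD l k j d) :
    d.size = ((['A','B','C'] : List Char).filter (fun c => (lastIn l k j c).isSome)).length := by
  obtain ⟨hnd, hget⟩ := h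
  have hmem : ∀ c : Char,
      c ∈ d.keys ↔ c ∈ (['A','B','C'] : List Char).filter (fun c => (lastIn l k j c).isSome) := by
    intro c
    rw [List.mem_filter]
    constructor
    · intro hc
      have h1 : ¬ d.get? c = none := fun hn =>
        ((PySem.Dict.get?_eq_none_iff_not_mem_keys d c).mp hn) hc
      rw [hget c] at h1
      by_cases hcomp : c = 'A' ∨ c = 'B' ∨ c = 'C'
      · refine ⟨by simpa using hcomp, ?_⟩
        simp only [wget, hcomp, if_true] at h1
        simpa [Option.isSome_iff_ne_none] using fun hn => h1 (by simp [hn])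
      · exact absurd (by simp [wget, hcomp]) h1
    · rintro ⟨hmem3, hsome⟩
      have hcomp : c = 'A' ∨ c = 'B' ∨ c = 'C' := by simpa using hmem3
      have h1 : d.get? c ≠ none := by
        rw [hget c]
        simp only [wget, hcomp, if_true]
        obtain ⟨x, hx⟩ := Option.isSome_iff_exists.mp hsome
        simp [hx]
      by_contra hc
      exact h1 ((PySem.Dict.get?_eq_none_iff_not_mem_keys d c).mpr hc)
  have hperm := (List.perm_ext_iff_of_nodup hnd
    (List.Nodup.filter _ (by decide))).mpr hmem
  have hlen := hperm.length_eq
  simpa [PySem.Dict.size, PySem.Dict.keys] using hlen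

theorem WD_size_le (l : List Char) {k j : Nat} {d : PySem.Dict Char Int} (h : WD l k j d) :
    d.size ≤ 3 := by
  rw [WD_size l h]
  exact le_trans (List.length_filter_le _ _) (by simp)

theorem WD_size3_iff (l : List Char) {k j : Nat} {d : PySem.Dict Char Int} (h : WD l k j d) :
    d.size = 3 ↔
      ((lastIn l k j 'A').isSome ∧ (lastIn l k j 'B').isSome ∧ (lastIn l k j 'C').isSome) := by
  rw [WD_size l h]
  cases hA : (lastIn l k j 'A').isSome <;> cases hB : (lastIn l k j 'B').isSome <;>
    cases hC : (lastIn l k j 'C').isSome <;> simp [List.filter, hA, hB, hC]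

theorem wget_succ (l : List Char) {k jn : Nat} (hkj : k ≤ jn) (hjl : jn < l.length) (c : Char) :
    wget l k (jn + 1) c =
      if c = l[jn] then (if c = 'A' ∨ c = 'B' ∨ c = 'C' then some ((jn : Nat) : Int) else none)
      else wget l k jn c := by
  unfold wget
  by_cases hcomp : c = 'A' ∨ c = 'B' ∨ c = 'C'
  · simp only [hcomp, if_true]
    rw [lastIn_succ l hkj]
    by_cases hce : c = l[jn]
    · have hg : l[jn]? = some c := by rw [List.getElem?_eq_getElem hjl, hce]
      simp [hg, hce]
    · have hg : ¬ (l[jn]? = some c) := by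
        rw [List.getElem?_eq_getElem hjl]
        simpa using fun h => hce h.symm
      simp [hg, hce]
  · simp [hcomp]

theorem aWhile_spec (l : List Char) (k : Nat) :
    ∀ (jn : Nat) (la : PySem.Dict Char Int), WD l k jn la → k ≤ jn → jn ≤ l.length →
    ∃ (la' : PySem.Dict Char Int) (j' : Nat),
      aWhile l (PySem.Set.ofList ['A','B','C']) (l.length : Int) la (jn : Int) = (la', (j' : Int)) ∧
      jn ≤ j' ∧ j' ≤ l.length ∧ WD l k j' la' ∧
      (la.size = 3 → la' = la ∧ j' = jn) ∧
      (la.size < 3 → (la'.size = 3 ∧ j' = minEnd3 l k + 1) ∨ (la'.size < 3 ∧ j' = l.length)) := by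
  intro jn la
  induction hfuel : l.length - jn generalizing jn la with
  | zero =>
    intro hWD hkj hjn
    have hjE : jn = l.length := by omega
    rw [aWhile]
    have hg : ¬ (la.size < 3 ∧ (jn : Int) < (l.length : Int)) := by
      rintro ⟨-, h⟩; exact absurd (by exact_mod_cast h) (by omega)
    rw [dif_neg hg]
    exact ⟨la, jn, rfl, le_rfl, hjn, hWD, fun _ => ⟨rfl, rfl⟩, fun hsz => Or.inr ⟨hsz, hjE⟩⟩
  | succ fuel ih =>
    intro hWD hkj hjn
    by_cases hsz : la.size < 3
    · by_cases hjl : jn < l.length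
      · -- guard true: consume l[jn]
        rw [aWhile, dif_pos ⟨hsz, by exact_mod_cast hjl⟩]
        have hcget : PySem.List.pyGetD l ((jn : Nat) : Int) ' ' = l[jn] := by
          simp [List.getD, List.getElem?_eq_getElem hjl]
        rw [hcget]
        have hnd := hWD.1
        have hget := hWD.2
        -- the updated dict satisfies WD at window [k, jn+1)
        by_cases hcomp : l[jn] = 'A' ∨ l[jn] = 'B' ∨ l[jn] = 'C'
        · have hct : PySem.Set.contains (PySem.Set.ofList ['A','B','C']) l[jn] = true := by
            rw [PySem.Set.contains_iff, PySem.Set.mem_ofList]; simpa using hcomp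
          rw [if_pos hct]
          have hWD1 : WD l k (jn + 1) (la.insert l[jn] ((jn : Nat) : Int)) := by
            refine ⟨PySem.Dict.nodup_keys_insert _ _ _ hnd, fun c' => ?_⟩
            rw [PySem.Dict.get?_insert, wget_succ l hkj hjl c']
            by_cases hce : c' = l[jn]
            · subst hce; simp [hcomp]
            · simp [hce, hget c']
          have hrec := ih (jn + 1) _ (by omega) hWD1 (by omega) (by omega)
          obtain ⟨la', j', heq, h1, h2, h3, h4, h5⟩ := hrec
          push_cast at heq
          refine ⟨la', j', heq, by omega, h2, h3, fun h => absurd h (by omega), fun _ => ?_⟩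
          by_cases h1sz : (la.insert l[jn] ((jn : Nat) : Int)).size = 3
          · obtain ⟨hla', hj'⟩ := h4 h1sz
            subst hla'; subst hj'
            left
            refine ⟨h1sz, ?_⟩
            have hall := (WD_size3_iff l hWD1).mp h1sz
            have tA := (lastIn_isSome_iff l (a := k) (by omega) 'A').mp hall.1
            have tB := (lastIn_isSome_iff l (a := k) (by omega) 'B').mp hall.2.1
            have tC := (lastIn_isSome_iff l (a := k) (by omega) 'C').mp hall.2.2
            have hn3 : ¬ ((lastIn l k jn 'A').isSome ∧ (lastIn l k jn 'B').isSome ∧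
                (lastIn l k jn 'C').isSome) := fun hcon =>
              absurd ((WD_size3_iff l hWD).mpr hcon) (by omega)
            have uA := lastIn_isSome_iff l (a := k) (b := jn) (by omega) 'A'
            have uB := lastIn_isSome_iff l (a := k) (b := jn) (by omega) 'B'
            have uC := lastIn_isSome_iff l (a := k) (b := jn) (by omega) 'C'
            have : ¬ (nextOcc l 'A' k < jn ∧ nextOcc l 'B' k < jn ∧ nextOcc l 'C' k < jn) := by
              rw [← uA, ← uB, ← uC] at *; tauto
            unfold minEnd3; omega
          · have h1sz' : (la.insert l[jn] ((jn : Nat) : Int)).size < 3 :=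
              lt_of_le_of_ne (WD_size_le l hWD1) h1sz
            exact h5 h1sz'
        · have hcf : PySem.Set.contains (PySem.Set.ofList ['A','B','C']) l[jn] = false := by
            rw [← Bool.not_eq_true, PySem.Set.contains_iff, PySem.Set.mem_ofList]
            simpa using hcomp
          rw [hcf]
          simp only [Bool.false_eq_true, if_false]
          have hWD1 : WD l k (jn + 1) la := by
            refine ⟨hnd, fun c' => ?_⟩
            rw [hget c', wget_succ l hkj hjl c']
            by_cases hce : c' = l[jn]
            · subst hce
              simp [hcomp, wget]
            · simp [hce]
          have hrec := ih (jn + 1) _ (by omega) hWD1 (by omega) (by omega)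
          obtain ⟨la', j', heq, h1, h2, h3, h4, h5⟩ := hrec
          push_cast at heq
          refine ⟨la', j', heq, by omega, h2, h3, fun h => absurd h (by omega), fun _ => ?_⟩
          by_cases h1sz : la.size = 3
          · omega
          · exact h5 hsz
      · -- j = n: exit
        have hjE : jn = l.length := by omega
        rw [aWhile]
        have hg : ¬ (la.size < 3 ∧ (jn : Int) < (l.length : Int)) := by
          rintro ⟨-, h⟩; exact absurd (by exact_mod_cast h) (by omega)
        rw [dif_neg hg]
        exact ⟨la, jn, rfl, le_rfl, hjn, hWD, fun _ => ⟨rfl, rfl⟩, fun hsz' => Or.inr ⟨hsz', hjE⟩⟩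
    · -- last_at already complete: the while loop does not run
      rw [aWhile]
      rw [dif_neg (by rintro ⟨h, -⟩; exact hsz h)]
      exact ⟨la, jn, rfl, le_rfl, hjn, hWD, fun _ => ⟨rfl, rfl⟩, fun h => absurd h hsz⟩

theorem lastIn_ne_some_of_getElem (l : List Char) {k b : Nat} {c : Char}
    (hk : k < l.length) (hne : l[k] ≠ c) : lastIn l k b c ≠ some k := fun h => by
  have := (lastIn_spec l h).2.2
  rw [List.getElem?_eq_getElem hk] at this
  exact hne (by simpa using this)

theorem lastIn_shift_ne (l : List Char) {k b : Nat} {c : Char}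
    (h : lastIn l k b c ≠ some k) : lastIn l (k + 1) b c = lastIn l k b c := by
  rw [lastIn_shift]; simp [h]

-- dropping position k from the window: what A's pop step does to last_at
theorem WD_pop (l : List Char) {k j' : Nat} {la' : PySem.Dict Char Int}
    (hWD : WD l k j' la') (hkn : k < l.length) :
    WD l (k + 1) j'
      (if la'.contains (l[k]) = true ∧ la'.get? (l[k]) = some ((k : Nat) : Int)
       then la'.erase (l[k]) else la') := by
  obtain ⟨hnd, hget⟩ := hWD
  by_cases hcomp : l[k] = 'A' ∨ l[k] = 'B' ∨ l[k] = 'C'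
  · by_cases hsk : lastIn l k j' (l[k]) = some k
    · have hcond : la'.contains l[k] = true ∧ la'.get? l[k] = some ((k : Nat) : Int) := by
        refine ⟨?_, ?_⟩
        · rw [PySem.Dict.contains_eq_isSome_get?, hget]; simp [wget, hcomp, hsk]
        · rw [hget]; simp [wget, hcomp, hsk]
      rw [if_pos hcond]
      refine ⟨by rw [dict_keys_erase]; exact List.Nodup.filter _ hnd, fun c' => ?_⟩
      rw [dict_get?_erase]
      by_cases hce : c' = l[k]
      · subst hce
        rw [if_pos rfl]
        simp [wget, hcomp, lastIn_shift, hsk]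
      · rw [if_neg hce, hget c']
        unfold wget
        by_cases hc' : c' = 'A' ∨ c' = 'B' ∨ c' = 'C'
        · simp only [hc', if_true]
          rw [lastIn_shift_ne l (lastIn_ne_some_of_getElem l hkn (fun h => hce h.symm))]
        · simp [hc']
    · have hcond : ¬ (la'.contains l[k] = true ∧ la'.get? l[k] = some ((k : Nat) : Int)) := by
        rintro ⟨-, h⟩
        rw [hget] at h
        simp only [wget, hcomp, if_true] at h
        apply hsk
        cases hlast : lastIn l k j' (l[k]) with
        | none => rw [hlast] at h; simp at h
        | some x =>
          rw [hlast] at h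
          have hxk : ((x : Nat) : Int) = ((k : Nat) : Int) := Option.some.inj h
          have hxe : x = k := by exact_mod_cast hxk
          rw [hxe]
      rw [if_neg hcond]
      refine ⟨hnd, fun c' => ?_⟩
      rw [hget c']
      unfold wget
      by_cases hc' : c' = 'A' ∨ c' = 'B' ∨ c' = 'C'
      · simp only [hc', if_true]
        by_cases hce : c' = l[k]
        · subst hce; rw [lastIn_shift_ne l hsk]
        · rw [lastIn_shift_ne l (lastIn_ne_some_of_getElem l hkn (fun h => hce h.symm))]
      · simp [hc']
  · have hcond : ¬ (la'.contains l[k] = true ∧ la'.get? l[k] = some ((k : Nat) : Int)) := by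
      rintro ⟨-, h⟩
      rw [hget] at h
      simp [wget, hcomp] at h
    rw [if_neg hcond]
    refine ⟨hnd, fun c' => ?_⟩
    rw [hget c']
    unfold wget
    by_cases hc' : c' = 'A' ∨ c' = 'B' ∨ c' = 'C'
    · simp only [hc', if_true]
      have hne : l[k] ≠ c' := fun h => hcomp (by rw [h]; exact hc')
      rw [lastIn_shift_ne l (lastIn_ne_some_of_getElem l hkn hne)]
    · simp [hc']

-- ---- A's outer loop ----
def stepA (cs : List Char) (n : Int) (companies : PySem.Set Char)
    (st : PySem.Dict Char Int × Int × Int) (p : Int × Char) : PySem.Dict Char Int × Int × Int :=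
  let w := aWhile cs companies n st.1 st.2.2
  let count := if w.1.size = 3 ∧ w.2 ≤ n then st.2.1 + (n - w.2 + 1) else st.2.1
  let la := if w.1.contains p.2 = true ∧ w.1.get? p.2 = some p.1 then w.1.erase p.2 else w.1
  (la, count, w.2)

def InvA (l : List Char) (k : Nat) (st : PySem.Dict Char Int × Int × Int) : Prop :=
  ∃ jn : Nat, st.2.2 = (jn : Int) ∧ k ≤ jn ∧ jn ≤ l.length ∧ WD l k jn st.1 ∧
    (st.1.size = 3 → jn = minEnd3 l k + 1)

theorem foldA (l : List Char) :
    ∀ (k : Nat) (st : PySem.Dict Char Int × Int × Int), k ≤ l.length - 2 → InvA l k st →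
    ((PySem.List.pyRange (k : Int) ((l.length - 2 : Nat) : Int) 1).foldl
        (fun st j => stepA l (l.length : Int) (PySem.Set.ofList ['A','B','C']) st
          (j, PySem.List.pyGetD (l.take (l.length - 2)) j ' ')) st).2.1
      = st.2.1 + ∑ i ∈ Finset.Ico k (l.length - 2), ((l.length : Int) - (minEnd3 l i : Int)) := by
  intro k st
  induction hfuel : l.length - 2 - k generalizing k st with
  | zero =>
    intro hk hinv
    have hke : k = l.length - 2 := by omega
    subst hke
    rw [PySem.List.pyRange_one_eq_nil (le_refl _)]
    simp
  | succ fuel ih =>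
    intro hk hinv
    have hklt : k < l.length - 2 := by omega
    have hkl : k < l.length := by omega
    rw [PySem.List.pyRange_one_cons (by exact_mod_cast hklt), List.foldl_cons]
    have hchar : PySem.List.pyGetD (l.take (l.length - 2)) ((k : Nat) : Int) ' ' = l[k] := by
      have hlt : k < (l.take (l.length - 2)).length := by simp; omega
      simp [List.getElem?_eq_getElem hlt, List.getElem_take]
    rw [hchar]
    obtain ⟨jn, hjn_eq, hkj, hjn_le, hWD, hsz3⟩ := hinv
    obtain ⟨la', j', heq, h1, h2, hWD', h4, h5⟩ := aWhile_spec l k jn st.1 hWD hkj hjn_le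
    -- where the while loop stops
    have hj'cases : (la'.size = 3 ∧ j' = minEnd3 l k + 1) ∨
        (la'.size < 3 ∧ j' = l.length ∧ minEnd3 l k = l.length) := by
      by_cases hs : st.1.size = 3
      · obtain ⟨hla, hj⟩ := h4 hs
        subst hla; subst hj
        exact Or.inl ⟨hs, hsz3 hs⟩
      · have hs' : st.1.size < 3 := lt_of_le_of_ne (WD_size_le l hWD) hs
        rcases h5 hs' with hL | ⟨hlt3, hje⟩
        · exact Or.inl hL
        · refine Or.inr ⟨hlt3, hje, ?_⟩
          have hnot : ¬ ((lastIn l k j' 'A').isSome ∧ (lastIn l k j' 'B').isSome ∧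
              (lastIn l k j' 'C').isSome) := fun hcon =>
            absurd ((WD_size3_iff l hWD').mpr hcon) (by omega)
          have uA := lastIn_isSome_iff l (a := k) (b := j') (by omega) 'A'
          have uB := lastIn_isSome_iff l (a := k) (b := j') (by omega) 'B'
          have uC := lastIn_isSome_iff l (a := k) (b := j') (by omega) 'C'
          have hA := nextOcc_le l 'A' (i := k) (by omega)
          have hB := nextOcc_le l 'B' (i := k) (by omega)
          have hC := nextOcc_le l 'C' (i := k) (by omega)
          have : ¬ (nextOcc l 'A' k < j' ∧ nextOcc l 'B' k < j' ∧ nextOcc l 'C' k < j') := by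
            rw [← uA, ← uB, ← uC]; tauto
          unfold minEnd3
          omega
    have hterm : (if la'.size = 3 ∧ ((j' : Nat) : Int) ≤ ((l.length : Nat) : Int)
          then st.2.1 + (((l.length : Nat) : Int) - ((j' : Nat) : Int) + 1) else st.2.1)
        = st.2.1 + (((l.length : Nat) : Int) - ((minEnd3 l k : Nat) : Int)) := by
      rcases hj'cases with ⟨hs3, hj⟩ | ⟨hlt3, hje, hme⟩
      · rw [if_pos ⟨hs3, by exact_mod_cast h2⟩, hj]
        push_cast
        ring
      · rw [if_neg (by rintro ⟨h, -⟩; omega), hme]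
        simp
    have hstep : stepA l (l.length : Int) (PySem.Set.ofList ['A','B','C']) st
        (((k : Nat) : Int), l[k]) =
        ((if la'.contains (l[k]) = true ∧ la'.get? (l[k]) = some ((k : Nat) : Int)
            then la'.erase (l[k]) else la'),
          st.2.1 + (((l.length : Nat) : Int) - ((minEnd3 l k : Nat) : Int)), ((j' : Nat) : Int)) := by
      simp only [stepA]
      rw [hjn_eq, heq]
      dsimp only
      rw [hterm]
    rw [hstep]
    -- the new state satisfies the invariant at k + 1
    have hWDpop := WD_pop l hWD' hkl
    have hInv1 : InvA l (k + 1)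
        ((if la'.contains (l[k]) = true ∧ la'.get? (l[k]) = some ((k : Nat) : Int)
            then la'.erase (l[k]) else la'),
          st.2.1 + (((l.length : Nat) : Int) - ((minEnd3 l k : Nat) : Int)), ((j' : Nat) : Int)) := by
      refine ⟨j', rfl, ?_, h2, hWDpop, ?_⟩
      · have := minEnd3_lb l k
        rcases hj'cases with ⟨-, hj⟩ | ⟨-, hje, -⟩ <;> omega
      · intro hs''
        dsimp only at hs''
        have hla'' : (if la'.contains (l[k]) = true ∧ la'.get? (l[k]) = some ((k : Nat) : Int)
            then la'.erase (l[k]) else la') = la' := by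
          by_cases hcond : la'.contains (l[k]) = true ∧ la'.get? (l[k]) = some ((k : Nat) : Int)
          · exfalso
            rw [if_pos hcond] at hs''
            have := dict_size_erase_lt la' (l[k]) hcond.1
            have := WD_size_le l hWD'
            omega
          · rw [if_neg hcond]
        rw [hla''] at hs''
        have hj : j' = minEnd3 l k + 1 := by
          rcases hj'cases with ⟨-, hj⟩ | ⟨hlt3, -, -⟩
          · exact hj
          · omega
        -- minEnd3 at k+1 equals minEnd3 at k here
        rw [hla''] at hWDpop
        have hall := (WD_size3_iff l hWDpop).mp hs''
        have tA := (lastIn_isSome_iff l (a := k+1) (b := j') (by omega) 'A').mp hall.1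
        have tB := (lastIn_isSome_iff l (a := k+1) (b := j') (by omega) 'B').mp hall.2.1
        have tC := (lastIn_isSome_iff l (a := k+1) (b := j') (by omega) 'C').mp hall.2.2
        have hmono := minEnd3_mono l k
        have : minEnd3 l (k + 1) < j' := by unfold minEnd3; omega
        omega
    have hih := ih (k + 1) _ (by omega) (by omega) hInv1
    have hcast : ((k : Nat) : Int) + 1 = (((k + 1 : Nat)) : Int) := by push_cast; ring
    rw [hcast, hih]
    rw [Finset.sum_eq_sum_Ico_succ_bot hklt]
    ring

-- ---- A as a closed-form sum over start positions ----
theorem A_eq_sum (s : String) :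
    analyzeInvestments s = ∑ i ∈ Finset.Ico 0 (s.toList.length - 2),
      ((s.toList.length : Int) - (minEnd3 s.toList i : Int)) := by
  have h0 : analyzeInvestments s =
      ((PySem.List.enumerate (PySem.List.slice s.toList none (some (-2))) 0).foldl
        (stepA s.toList (PySem.Str.len s) (PySem.Set.ofList ['A','B','C']))
        (PySem.Dict.empty, 0, 0)).2.1 := rfl
  rw [h0, PySem.Str.len_eq]
  rw [PySem.List.slice_to_neg_ofNat s.toList 2 (by omega)]
  rw [PySem.List.enumerate_eq_map_pyRange _ ' ']
  rw [List.foldl_map]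
  have hlen : PySem.List.len (List.take (s.toList.length - 2) s.toList)
      = ((s.toList.length - 2 : Nat) : Int) := by
    rw [PySem.List.len_eq, List.length_take]
    congr 1
    omega
  rw [hlen]
  have hWD0 : WD s.toList 0 0 PySem.Dict.empty := by
    refine ⟨by rw [PySem.Dict.keys_empty]; exact List.nodup_nil, fun c => ?_⟩
    rw [PySem.Dict.get?_empty]
    simp [wget, lastIn_none s.toList (le_refl 0) c]
  have h := foldA s.toList 0 (PySem.Dict.empty, 0, 0) (by omega)
    ⟨0, rfl, le_rfl, by omega, hWD0,
      fun hx => absurd hx (by rw [PySem.Dict.size_empty]; omega)⟩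
  simpa using h

-- ---- B's loop ----
def stepB (cs : List Char) (n : Int) (st : PySem.Dict Char Int × Int) (i : Int) :
    PySem.Dict Char Int × Int :=
  let c := PySem.List.pyGetD cs i ' '
  let nxt := if st.1.contains c then st.1.insert c i else st.1
  let m := max (max (nxt.getD 'A' 0) (nxt.getD 'B' 0)) (nxt.getD 'C' 0)
  (nxt, if m < n then st.2 + (n - m) else st.2)

def InvB (l : List Char) (k : Nat) (d : PySem.Dict Char Int) : Prop :=
  (∀ c : Char, d.contains c = true ↔ (c = 'A' ∨ c = 'B' ∨ c = 'C')) ∧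
  d.getD 'A' 0 = ((nextOcc l 'A' k : Nat) : Int) ∧
  d.getD 'B' 0 = ((nextOcc l 'B' k : Nat) : Int) ∧
  d.getD 'C' 0 = ((nextOcc l 'C' k : Nat) : Int)

theorem foldB (l : List Char) :
    ∀ (k : Nat), k ≤ l.length → ∀ (d : PySem.Dict Char Int) (count : Int), InvB l k d →
    ((PySem.List.pyRange ((k : Int) - 1) (-1) (-1)).foldl (stepB l (l.length : Int)) (d, count)).2
      = count + ∑ i ∈ Finset.range k, ((l.length : Int) - (minEnd3 l i : Int)) := by
  intro k
  induction k with
  | zero =>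
    intro _ d count _
    rw [show ((0 : Nat) : Int) - 1 = -1 by norm_num]
    rw [PySem.List.pyRange_neg_one_eq_nil (by norm_num)]
    simp
  | succ k ih =>
    intro hk d count hinv
    have hkl : k < l.length := hk
    have hcast : ((k + 1 : Nat) : Int) - 1 = ((k : Nat) : Int) := by push_cast; ring
    rw [hcast, PySem.List.pyRange_neg_one_cons (by omega), List.foldl_cons]
    have hchar : PySem.List.pyGetD l ((k : Nat) : Int) ' ' = l[k] := by
      simp [List.getElem?_eq_getElem hkl]
    obtain ⟨hcont, hA, hB, hC⟩ := hinv
    have hinv' : InvB l k (if d.contains (l[k]) = true then d.insert (l[k]) ((k : Nat) : Int) else d) := by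
      by_cases hcomp : l[k] = 'A' ∨ l[k] = 'B' ∨ l[k] = 'C'
      · rw [if_pos ((hcont (l[k])).mpr hcomp)]
        have hupd : ∀ X : Char, d.getD X 0 = ((nextOcc l X (k+1) : Nat) : Int) →
            (d.insert (l[k]) ((k : Nat) : Int)).getD X 0 = ((nextOcc l X k : Nat) : Int) := by
          intro X hX
          rw [PySem.Dict.getD_insert, nextOcc_succ l X hkl]
          by_cases hx : X = l[k]
          · subst hx; simp
          · rw [if_neg hx, hX]
            have hb : (l[k] == X) = false := by
              simp only [beq_eq_false_iff_ne, ne_eq]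
              exact fun h => hx h.symm
            rw [hb]
            simp
        refine ⟨fun c' => ?_, hupd 'A' hA, hupd 'B' hB, hupd 'C' hC⟩
        rw [PySem.Dict.contains_insert]
        simp only [Bool.or_eq_true, beq_iff_eq]
        rw [hcont c']
        constructor
        · rintro (rfl | h)
          · exact hcomp
          · exact h
        · exact Or.inr
      · have hcf : d.contains (l[k]) = false := by
          cases hb : d.contains (l[k]) with
          | false => rfl
          | true => exact absurd ((hcont (l[k])).mp hb) hcomp
        rw [hcf]
        simp only [Bool.false_eq_true, if_false]
        have hkeep : ∀ X : Char, (X = 'A' ∨ X = 'B' ∨ X = 'C') →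
            d.getD X 0 = ((nextOcc l X (k+1) : Nat) : Int) →
            d.getD X 0 = ((nextOcc l X k : Nat) : Int) := by
          intro X hXc hX
          rw [nextOcc_succ l X hkl]
          have hb : (l[k] == X) = false := by
            simp only [beq_eq_false_iff_ne, ne_eq]
            exact fun h => hcomp (h ▸ hXc)
          rw [hb]
          simpa using hX
        exact ⟨hcont, hkeep 'A' (by tauto) hA, hkeep 'B' (by tauto) hB, hkeep 'C' (by tauto) hC⟩
    obtain ⟨hc', hA', hB', hC'⟩ := hinv'
    have hm : max (max ((if d.contains (l[k]) = true then d.insert (l[k]) ((k : Nat) : Int) else d).getD 'A' 0)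
          ((if d.contains (l[k]) = true then d.insert (l[k]) ((k : Nat) : Int) else d).getD 'B' 0))
          ((if d.contains (l[k]) = true then d.insert (l[k]) ((k : Nat) : Int) else d).getD 'C' 0)
        = ((minEnd3 l k : Nat) : Int) := by
      rw [hA', hB', hC']
      unfold minEnd3
      push_cast
      rfl
    have hstep : stepB l ((l.length : Nat) : Int) (d, count) ((k : Nat) : Int)
        = ((if d.contains (l[k]) = true then d.insert (l[k]) ((k : Nat) : Int) else d),
           count + (((l.length : Nat) : Int) - ((minEnd3 l k : Nat) : Int))) := by
      simp only [stepB]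
      rw [hchar]
      rw [hm]
      by_cases hlt : minEnd3 l k < l.length
      · rw [if_pos (show ((minEnd3 l k : Nat) : Int) < ((l.length : Nat) : Int) from
          by exact_mod_cast hlt)]
      · have hme : minEnd3 l k = l.length :=
          le_antisymm (minEnd3_le l (by omega)) (by omega)
        rw [if_neg (show ¬ ((minEnd3 l k : Nat) : Int) < ((l.length : Nat) : Int) from
          by exact_mod_cast hlt), hme]
        simp
    rw [hstep]
    rw [ih (by omega) _ _ ⟨hc', hA', hB', hC'⟩]
    rw [Finset.sum_range_succ]
    ring

-- ---- B as the same closed-form sum over all start positions ----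
theorem B_eq_sum (s : String) :
    analyzeInvestments_alt s = ∑ i ∈ Finset.range s.toList.length,
      ((s.toList.length : Int) - (minEnd3 s.toList i : Int)) := by
  have h0 : analyzeInvestments_alt s =
      ((PySem.List.pyRange (PySem.Str.len s - 1) (-1) (-1)).foldl
        (stepB s.toList (PySem.Str.len s))
        (PySem.Dict.ofList [('A', PySem.Str.len s), ('B', PySem.Str.len s), ('C', PySem.Str.len s)], 0)).2 := rfl
  rw [h0, PySem.Str.len_eq]
  have hitems : (PySem.Dict.ofList [('A', ((s.toList.length : Nat) : Int)),
      ('B', ((s.toList.length : Nat) : Int)), ('C', ((s.toList.length : Nat) : Int))]).items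
      = [('A', ((s.toList.length : Nat) : Int)), ('B', ((s.toList.length : Nat) : Int)),
         ('C', ((s.toList.length : Nat) : Int))] := rfl
  have hinv0 : InvB s.toList s.toList.length
      (PySem.Dict.ofList [('A', ((s.toList.length : Nat) : Int)),
        ('B', ((s.toList.length : Nat) : Int)), ('C', ((s.toList.length : Nat) : Int))]) := by
    refine ⟨fun c => ?_, ?_, ?_, ?_⟩
    · simp only [PySem.Dict.contains, hitems, List.any_cons, List.any_nil,
        Bool.or_false, Bool.or_eq_true, beq_iff_eq]
      constructor
      · rintro (h | h | h) <;> simp [h.symm]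
      · rintro (h | h | h) <;> simp [h]
    all_goals
      simp only [PySem.Dict.getD, PySem.Dict.get?, hitems, List.find?]
      rw [nextOcc_len]
      rfl
  have h := foldB s.toList s.toList.length le_rfl _ 0 hinv0
  simpa using h

-- ---- the two sums agree: starts within 2 of the end contribute nothing ----
theorem A_eq_B (s : String) : analyzeInvestments s = analyzeInvestments_alt s := by
  rw [A_eq_sum, B_eq_sum, Finset.range_eq_Ico]
  rw [← Finset.sum_Ico_consecutive (m := 0) (n := s.toList.length - 2) (k := s.toList.length)
      _ (Nat.zero_le _) (by omega)]
  have hzero : ∑ i ∈ Finset.Ico (s.toList.length - 2) s.toList.length,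
      ((s.toList.length : Int) - (minEnd3 s.toList i : Int)) = 0 := by
    apply Finset.sum_eq_zero
    intro i hi
    rw [Finset.mem_Ico] at hi
    rw [minEnd3_big s.toList (by omega) (by omega)]
    ring
  rw [hzero]
  ring

-- ===== VERDICT (by name: the statement is the Claim_ definition above) =====
theorem analyzeInvestments_spec : Claim_equal_analyzeInvestments := by
  intro s _
  unfold Spec_analyzeInvestments
  exact A_eq_B s
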